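-- pv_equiv track=rewrite | github.com/abhyudaya-3701/ml-teaching | scripts/check_links.py | categorize_broken_link
-- ===== SOURCE A (Python) =====
-- def categorize_broken_link(url: str) -> str:
--     """Categorize the type of broken link."""
--     if url.endswith('.html'):
--         return 'missing_html'
--     elif url.endswith('.pdf'):
--         return 'missing_pdf'
--     elif url.endswith('.ipynb'):
--         return 'missing_notebook'
--     elif any(url.endswith(ext) for ext in ['.tex', '.py', '.md']):
--         return 'missing_source'
--     else:
--         return 'other'
-- ===== SOURCE B (Python) =====
-- _EXT_MAP = {
--     '.html': 'missing_html',
--     '.pdf': 'missing_pdf',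
--     '.ipynb': 'missing_notebook',
--     '.tex': 'missing_source',
--     '.py': 'missing_source',
--     '.md': 'missing_source',
-- }
--
--
-- def categorize_broken_link(url: str) -> str:
--     """Categorize the type of broken link."""
--     chars = []
--     for ch in reversed(url):
--         chars.append(ch)
--         if ch == '.':
--             break
--     ext = ''.join(reversed(chars))
--     return _EXT_MAP.get(ext, 'other')
-- ===== Notes on version B (the rewrite author's own statement) =====
-- stated objective: idiomatic
-- what changed: Replaced the chain of endswith suffix tests by a single right-to-left scan that extracts the extension once and classifies it with one dict lookup.
import Mathlib
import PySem

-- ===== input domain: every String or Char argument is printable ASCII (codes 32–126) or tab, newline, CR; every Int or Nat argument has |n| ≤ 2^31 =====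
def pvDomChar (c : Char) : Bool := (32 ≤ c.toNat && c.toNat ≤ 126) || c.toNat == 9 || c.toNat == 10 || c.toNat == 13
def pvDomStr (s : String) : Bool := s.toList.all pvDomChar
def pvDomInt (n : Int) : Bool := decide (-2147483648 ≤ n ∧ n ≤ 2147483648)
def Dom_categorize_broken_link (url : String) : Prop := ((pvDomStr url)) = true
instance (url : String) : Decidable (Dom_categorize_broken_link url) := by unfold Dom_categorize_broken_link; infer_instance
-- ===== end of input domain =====

-- B replaces A's endswith chain by a single right-to-left scan that extracts the
-- extension once and classifies it with one table lookup (objective: idiomatic).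

-- ===== PORT A =====
def categorize_broken_link (url : String) : String :=
  if PySem.Str.endswith url ".html" then "missing_html"
  else if PySem.Str.endswith url ".pdf" then "missing_pdf"
  else if PySem.Str.endswith url ".ipynb" then "missing_notebook"
  else if ([".tex", ".py", ".md"] : List String).any (fun ext => PySem.Str.endswith url ext) then
    "missing_source"
  else "other"

-- ===== PORT B =====
def pvExtMap : PySem.Dict String String :=
  PySem.Dict.ofList
    [(".html", "missing_html"), (".pdf", "missing_pdf"), (".ipynb", "missing_notebook"),
     (".tex", "missing_source"), (".py", "missing_source"), (".md", "missing_source")]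

-- the `for ch in reversed(url): chars.append(ch); if ch == '.': break` loop of Source B
def pvExtLoop (chars : List Char) : List Char → List Char
  | [] => chars
  | c :: cs => if c = '.' then chars ++ [c] else pvExtLoop (chars ++ [c]) cs

def categorize_broken_link_alt (url : String) : String :=
  let chars := pvExtLoop [] url.toList.reverse
  let ext := String.ofList chars.reverse
  pvExtMap.getD ext "other"

-- ===== PRECONDITION & SPEC =====
def Spec_categorize_broken_link (url : String) (out : String) : Prop := out = categorize_broken_link_alt url
instance (url : String) (out : String) : Decidable (Spec_categorize_broken_link url out) := by unfold Spec_categorize_broken_link; infer_instance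

-- ===== CLAIM (what is proved, stated in full; the proofs are below) =====
def Claim_equal_categorize_broken_link : Prop := ∀ (url : String), Dom_categorize_broken_link url → Spec_categorize_broken_link url (categorize_broken_link url)

-- ===== LEMMAS AND PROOFS =====

lemma pvExtLoop_spec (r acc : List Char) :
    pvExtLoop acc r =
      if '.' ∈ r then acc ++ r.takeWhile (· ≠ '.') ++ ['.'] else acc ++ r := by
  induction r generalizing acc with
  | nil => simp [pvExtLoop]
  | cons c cs ih =>
    by_cases hc : c = '.'
    · subst hc; simp [pvExtLoop]
    · simp [pvExtLoop, hc, ih, Ne.symm hc]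

lemma pvExtLoop_reverse (r : List Char) :
    (pvExtLoop [] r).reverse =
      if '.' ∈ r then '.' :: (r.takeWhile (· ≠ '.')).reverse else r.reverse := by
  rw [pvExtLoop_spec]
  split <;> simp

-- a dot-free block followed by '.' is a prefix of r iff r starts with exactly that block before its first '.'
lemma prefix_dot_iff (v r : List Char) (hv : '.' ∉ v) :
    (v ++ ['.']) <+: r ↔ ('.' ∈ r ∧ r.takeWhile (· ≠ '.') = v) := by
  induction v generalizing r with
  | nil =>
    cases r with
    | nil => simp
    | cons c cs =>
      by_cases hc : c = '.'
      · subst hc; simp [List.cons_prefix_cons]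
      · simp [hc, List.cons_prefix_cons, Ne.symm hc]
  | cons a v' ih =>
    have ha : a ≠ '.' := by intro h; exact hv (h ▸ List.mem_cons_self)
    have hv' : '.' ∉ v' := fun h => hv (List.mem_cons_of_mem _ h)
    cases r with
    | nil => simp
    | cons c cs =>
      by_cases hc : c = a
      · subst hc
        simp [List.cons_prefix_cons, ih cs hv', ha, Ne.symm ha]
      · rw [List.cons_append, List.cons_prefix_cons]
        constructor
        · rintro ⟨h, -⟩; exact absurd h.symm hc
        · rintro ⟨-, htw⟩
          exfalso
          by_cases hcdot : c = '.'
          · simp [hcdot] at htw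
          · rw [List.takeWhile_cons] at htw
            simp [hcdot] at htw
            exact hc htw.1

-- endswith with a key '.'++w (w dot-free) read on the reversed character list
lemma endswith_key_iff (url : String) (w : List Char) (hw : '.' ∉ w) :
    PySem.Str.endswith url (String.ofList ('.' :: w)) = true ↔
      ('.' ∈ url.toList.reverse ∧
        (url.toList.reverse).takeWhile (· ≠ '.') = w.reverse) := by
  have h1 : PySem.Str.endswith url (String.ofList ('.' :: w)) = true ↔
      ('.' :: w) <:+ url.toList := by
    simpa using PySem.Chars.endswith_iff url.toList ('.' :: w)
  rw [h1, ← List.reverse_prefix]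
  have h2 : ('.' :: w).reverse = w.reverse ++ ['.'] := by simp
  rw [h2, prefix_dot_iff _ _ (by simpa using hw)]

-- B's table test against any key agrees with A's endswith test for that key
lemma ext_beq_key (url : String) (w : List Char) (hw : '.' ∉ w) :
    (String.ofList ('.' :: w) == String.ofList (pvExtLoop [] url.toList.reverse).reverse) =
      PySem.Str.endswith url (String.ofList ('.' :: w)) := by
  rw [Bool.eq_iff_iff, beq_iff_eq, eq_comm, endswith_key_iff url w hw]
  rw [pvExtLoop_reverse]
  by_cases hdot : '.' ∈ url.toList.reverse
  · rw [if_pos hdot]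
    constructor
    · intro h
      have h' := congrArg String.toList h
      simp at h'
      exact ⟨hdot, by simpa using congrArg List.reverse h'⟩
    · rintro ⟨-, h⟩
      rw [h]; simp
  · rw [if_neg hdot]
    constructor
    · intro h
      have h' := congrArg String.toList h
      simp at h'
      exact absurd (h' ▸ List.mem_cons_self) (by simpa using hdot)
    · rintro ⟨h, -⟩; exact absurd h hdot

theorem categorize_broken_link_spec : Claim_equal_categorize_broken_link := by
  intro url _
  unfold Spec_categorize_broken_link categorize_broken_link categorize_broken_link_alt
  have e1 := ext_beq_key url ['h','t','m','l'] (by decide)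
  have e2 := ext_beq_key url ['p','d','f'] (by decide)
  have e3 := ext_beq_key url ['i','p','y','n','b'] (by decide)
  have e4 := ext_beq_key url ['t','e','x'] (by decide)
  have e5 := ext_beq_key url ['p','y'] (by decide)
  have e6 := ext_beq_key url ['m','d'] (by decide)
  simp only [show String.ofList ('.' :: ['h','t','m','l']) = ".html" from rfl] at e1
  simp only [show String.ofList ('.' :: ['p','d','f']) = ".pdf" from rfl] at e2
  simp only [show String.ofList ('.' :: ['i','p','y','n','b']) = ".ipynb" from rfl] at e3
  simp only [show String.ofList ('.' :: ['t','e','x']) = ".tex" from rfl] at e4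
  simp only [show String.ofList ('.' :: ['p','y']) = ".py" from rfl] at e5
  simp only [show String.ofList ('.' :: ['m','d']) = ".md" from rfl] at e6
  have hmap : pvExtMap = PySem.Dict.mk
      [(".html", "missing_html"), (".pdf", "missing_pdf"), (".ipynb", "missing_notebook"),
       (".tex", "missing_source"), (".py", "missing_source"), (".md", "missing_source")] := by rfl
  simp only [hmap, PySem.Dict.getD_eq_get?_getD, PySem.Dict.get?_mk_cons, List.any_cons,
    List.any_nil, e1, e2, e3, e4, e5, e6]
  split_ifs <;> simp_all [PySem.Dict.get?]
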